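-- pv_equiv track=rewrite | github.com/ervip/data-science-python-certification-course | Assignments/01 Introduction to Data Science and Machine Learning using Python/Case Study/Question 01.py | odd_even_factors
-- ===== SOURCE A (Python) =====
-- def odd_even_factors(number):
--     """Finds the factors of the given number
--
--     Args:
--         number (int): Number for which factors needs to be found out
--
--     Returns:
--         Factors categorized as even, odd in dict
--     """
--
--     factors = dict(odd=[], even=[])
--     for n in range(1, number+1):
--         if number % n == 0:
--             if n & 1:
--                 factors['odd'].append(n)
--             else:
--                 factors['even'].append(n)
--     return factors
-- ===== SOURCE B (Python) =====
-- def odd_even_factors(number):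
--     """Finds the factors of the given number
--
--     Trial division up to sqrt(number), collecting each factor pair,
--     then sorting each parity class.
--     """
--     odd, even = [], []
--     d = 1
--     while d * d <= number:
--         if number % d == 0:
--             (odd if d & 1 else even).append(d)
--             q = number // d
--             if d * d != number:
--                 (odd if q & 1 else even).append(q)
--         d += 1
--     odd.sort()
--     even.sort()
--     return dict(odd=odd, even=even)
-- ===== Notes on version B (the rewrite author's own statement) =====
-- stated objective: faster
-- what changed: Replaces the full scan of 1..n with trial division up to sqrt(n) that collects both members of each factor pair, then sorts each parity class.
import Mathlib
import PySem

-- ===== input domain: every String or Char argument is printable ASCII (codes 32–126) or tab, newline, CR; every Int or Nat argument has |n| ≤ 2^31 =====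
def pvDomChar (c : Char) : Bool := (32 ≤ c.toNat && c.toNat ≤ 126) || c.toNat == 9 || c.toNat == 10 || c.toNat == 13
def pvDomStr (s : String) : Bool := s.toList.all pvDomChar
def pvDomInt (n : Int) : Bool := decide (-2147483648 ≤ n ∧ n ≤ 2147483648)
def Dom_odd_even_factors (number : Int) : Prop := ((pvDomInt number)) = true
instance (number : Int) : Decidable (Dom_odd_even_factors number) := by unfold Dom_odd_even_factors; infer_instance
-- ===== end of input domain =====

-- B replaces A's full scan of 1..n by trial division up to sqrt(n) collecting both
-- members of each factor pair, then sorts each parity class (objective: faster).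

-- ===== PORT A =====
def odd_even_factors (number : Int) : List (String × List Int) :=
  let factors : PySem.Dict String (List Int) := PySem.Dict.mk [("odd", []), ("even", [])]
  let factors := (PySem.List.pyRange 1 (number + 1)).foldl
    (fun factors n =>
      if PySem.Int.mod number n == 0 then
        -- 'n & 1': every n of this loop satisfies n ≥ 1, where bitwise AND with 1 is n % 2
        if PySem.Int.mod n 2 == 1 then
          PySem.Dict.modify factors "odd" [] (fun l => l ++ [n])
        else
          PySem.Dict.modify factors "even" [] (fun l => l ++ [n])
      else factors)
    factors
  factors.items

-- ===== PORT B =====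
-- the while loop of Source B: d runs while d*d ≤ number, appending d and then number//d to the
-- parity-matching accumulator ('x & 1' with x ≥ 1 is x % 2)
def pvLoopB (number d : Int) (odd even : List Int) : List Int × List Int :=
  if h : d * d ≤ number then
    if PySem.Int.mod number d == 0 then
      pvLoopB number (d + 1)
        ((if PySem.Int.mod d 2 == 1 then odd ++ [d] else odd) ++
          (if d * d != number && PySem.Int.mod (PySem.Int.floordiv number d) 2 == 1 then
            [PySem.Int.floordiv number d] else []))
        ((if PySem.Int.mod d 2 == 1 then even else even ++ [d]) ++
          (if d * d != number && !(PySem.Int.mod (PySem.Int.floordiv number d) 2 == 1) then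
            [PySem.Int.floordiv number d] else []))
    else pvLoopB number (d + 1) odd even
  else (odd, even)
termination_by (number + 1 - d).toNat
decreasing_by
  all_goals
    · have h2 : d ≤ d * d := by
        rcases le_or_gt d 0 with hd | hd
        · exact hd.trans (mul_self_nonneg d)
        · nlinarith
      omega

def odd_even_factors_alt (number : Int) : List (String × List Int) :=
  let p := pvLoopB number 1 [] []
  [("odd", PySem.List.sorted p.1 (fun x => x)),
   ("even", PySem.List.sorted p.2 (fun x => x))]

-- ===== PRECONDITION & SPEC =====
def Spec_odd_even_factors (number : Int) (out : List (String × List Int)) : Prop := out = odd_even_factors_alt number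
instance (number : Int) (out : List (String × List Int)) : Decidable (Spec_odd_even_factors number out) := by unfold Spec_odd_even_factors; infer_instance

-- ===== CLAIM (what is proved, stated in full; the proofs are below) =====
def Claim_equal_odd_even_factors : Prop := ∀ (number : Int), Dom_odd_even_factors number → Spec_odd_even_factors number (odd_even_factors number)

-- ===== LEMMAS AND PROOFS =====

-- proof-layer helpers
def pvOdd (x : Int) : Bool := PySem.Int.mod x 2 == 1

def pvDivs (n : Int) : List Int :=
  (PySem.List.pyRange 1 (n + 1)).filter (fun x => PySem.Int.mod n x == 0)

-- the multiset of divisors pvLoopB emits from trial divisor d upward, pairs in order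
def pvGen (number d : Int) : List Int :=
  if h : d * d ≤ number then
    (if PySem.Int.mod number d == 0 then
       if d * d != number then [d, PySem.Int.floordiv number d] else [d]
     else []) ++ pvGen number (d + 1)
  else []
termination_by (number + 1 - d).toNat
decreasing_by
  all_goals
    · have h2 : d ≤ d * d := by
        rcases le_or_gt d 0 with hd | hd
        · exact hd.trans (mul_self_nonneg d)
        · nlinarith
      omega

-- A's fold keeps the two-entry dict shape, appending the parity-filtered elements
theorem pvAfold (n : Int) (L : List Int) (a b : List Int) :
    (L.foldl
      (fun factors x =>
        if PySem.Int.mod n x == 0 then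
          if PySem.Int.mod x 2 == 1 then
            PySem.Dict.modify factors "odd" [] (fun l => l ++ [x])
          else
            PySem.Dict.modify factors "even" [] (fun l => l ++ [x])
        else factors)
      (PySem.Dict.mk [("odd", a), ("even", b)])) =
    PySem.Dict.mk
      [("odd", a ++ L.filter (fun x => pvOdd x && (PySem.Int.mod n x == 0))),
       ("even", b ++ L.filter (fun x => !pvOdd x && (PySem.Int.mod n x == 0)))] := by
  induction L generalizing a b with
  | nil => simp
  | cons y L ih =>
    simp only [List.foldl_cons]
    by_cases hdiv : PySem.Int.mod n y = 0
    · by_cases hodd : y % 2 = 1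
      · have hyd2 : ¬ (2:Int) ∣ y := by omega
        have hstep :
            (if PySem.Int.mod n y == 0 then
              if PySem.Int.mod y 2 == 1 then
                PySem.Dict.modify (PySem.Dict.mk [("odd", a), ("even", b)]) "odd" [] (fun l => l ++ [y])
              else
                PySem.Dict.modify (PySem.Dict.mk [("odd", a), ("even", b)]) "even" [] (fun l => l ++ [y])
            else PySem.Dict.mk [("odd", a), ("even", b)]) =
            PySem.Dict.mk [("odd", a ++ [y]), ("even", b)] := by
          simp [hdiv, hodd, PySem.Dict.modify, PySem.Dict.insert, PySem.Dict.getD,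
            PySem.Dict.get?]
        rw [hstep, ih]
        simp [List.filter_cons, pvOdd, hdiv, hodd, hyd2]
      · have hyd2 : (2:Int) ∣ y := by omega
        have hstep :
            (if PySem.Int.mod n y == 0 then
              if PySem.Int.mod y 2 == 1 then
                PySem.Dict.modify (PySem.Dict.mk [("odd", a), ("even", b)]) "odd" [] (fun l => l ++ [y])
              else
                PySem.Dict.modify (PySem.Dict.mk [("odd", a), ("even", b)]) "even" [] (fun l => l ++ [y])
            else PySem.Dict.mk [("odd", a), ("even", b)]) =
            PySem.Dict.mk [("odd", a), ("even", b ++ [y])] := by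
          simp [hdiv, hodd, PySem.Dict.modify, PySem.Dict.insert, PySem.Dict.getD,
            PySem.Dict.get?]
        rw [hstep, ih]
        simp [List.filter_cons, pvOdd, hdiv, hodd, hyd2]
    · have hstep :
          (if PySem.Int.mod n y == 0 then
            if PySem.Int.mod y 2 == 1 then
              PySem.Dict.modify (PySem.Dict.mk [("odd", a), ("even", b)]) "odd" [] (fun l => l ++ [y])
            else
              PySem.Dict.modify (PySem.Dict.mk [("odd", a), ("even", b)]) "even" [] (fun l => l ++ [y])
          else PySem.Dict.mk [("odd", a), ("even", b)]) =
          PySem.Dict.mk [("odd", a), ("even", b)] := by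
        simp [hdiv]
      rw [hstep, ih]
      simp [List.filter_cons, pvOdd, hdiv]

-- characterisation of A's output
theorem pvAchar (n : Int) :
    odd_even_factors n =
      [("odd", (pvDivs n).filter pvOdd), ("even", (pvDivs n).filter (fun x => !pvOdd x))] := by
  simp only [odd_even_factors]
  rw [pvAfold]
  simp [pvDivs, List.filter_filter]

-- B's loop = accumulators ++ parity-filtered pvGen
theorem pvBfold (n : Int) : ∀ (d : Int) (a b : List Int),
    pvLoopB n d a b =
      (a ++ (pvGen n d).filter pvOdd, b ++ (pvGen n d).filter (fun x => !pvOdd x)) := by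
  intro d a b
  fun_induction pvLoopB n d a b with
  | case1 d a b h hdiv ih =>
    simp only [dite_eq_ite] at ih
    rw [pvGen, ih]
    by_cases hd2 : d % 2 = 1
    · have hd2' : ¬ (2:Int) ∣ d := by omega
      by_cases hq2 : PySem.Int.floordiv n d % 2 = 1
      · have hq2' : ¬ (2:Int) ∣ PySem.Int.floordiv n d := by omega
        by_cases hne : d * d = n <;>
          simp [h, hdiv, hne, hd2, hd2', hq2, hq2', pvOdd, List.append_assoc]
      · have hq2' : (2:Int) ∣ PySem.Int.floordiv n d := by omega
        by_cases hne : d * d = n <;>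
          simp [h, hdiv, hne, hd2, hd2', hq2, hq2', pvOdd, List.append_assoc]
    · have hd2' : (2:Int) ∣ d := by omega
      by_cases hq2 : PySem.Int.floordiv n d % 2 = 1
      · have hq2' : ¬ (2:Int) ∣ PySem.Int.floordiv n d := by omega
        by_cases hne : d * d = n <;>
          simp [h, hdiv, hne, hd2, hd2', hq2, hq2', pvOdd, List.append_assoc]
      · have hq2' : (2:Int) ∣ PySem.Int.floordiv n d := by omega
        by_cases hne : d * d = n <;>
          simp [h, hdiv, hne, hd2, hd2', hq2, hq2', pvOdd, List.append_assoc]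
  | case2 d a b h hdiv ih =>
    rw [pvGen, ih]
    simp [h, hdiv]
  | case3 d a b h =>
    rw [pvGen]
    simp [h]

-- membership in pvGen: exactly the divisors whose pair lies entirely at or above d
theorem pvGen_mem (n : Int) : ∀ d, 1 ≤ d → ∀ x : Int,
    (x ∈ pvGen n d ↔ ∃ y, d ≤ x ∧ d ≤ y ∧ x * y = n) := by
  intro d
  fun_induction pvGen n d with
  | case1 d h ih =>
    intro hd x
    have hd0 : (0:Int) < d := by omega
    have ih' := ih (by omega) x
    rw [List.mem_append, ih']
    constructor
    · intro hx
      rcases hx with hx | hx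
      · -- x came from the step list at d
        by_cases hdiv : PySem.Int.mod n d = 0
        · have hdvd : d ∣ n := (PySem.Int.mod_eq_zero_iff_dvd n d).mp hdiv
          obtain ⟨c, hc⟩ := hdvd
          have hq : PySem.Int.floordiv n d = c := by
            rw [PySem.Int.floordiv_eq_ediv_of_pos hd0, hc]
            exact Int.mul_ediv_cancel_left c (by omega)
          have hdc : d ≤ c := le_of_mul_le_mul_left (by rw [← hc]; exact h) hd0
          by_cases hne : d * d = n
          · simp [hdiv, hne] at hx
            exact ⟨c, by omega, hdc, by rw [hx]; exact hc.symm⟩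
          · simp [hdiv, hne, hq] at hx
            rcases hx with hx | hx
            · exact ⟨c, by omega, hdc, by rw [hx]; exact hc.symm⟩
            · exact ⟨d, by omega, le_rfl, by rw [hx, mul_comm]; exact hc.symm⟩
        · simp [hdiv] at hx
      · obtain ⟨y, h1, h2, h3⟩ := hx
        exact ⟨y, by omega, by omega, h3⟩
    · rintro ⟨y, hx1, hy1, hxy⟩
      by_cases hbig : d + 1 ≤ x ∧ d + 1 ≤ y
      · exact Or.inr ⟨y, hbig.1, hbig.2, hxy⟩
      · left
        have hdvd : d ∣ n := by
          rcases (by omega : x = d ∨ y = d) with he | he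
          · exact ⟨y, by rw [← he]; exact hxy.symm⟩
          · exact ⟨x, by rw [← he, mul_comm]; exact hxy.symm⟩
        have hdiv : PySem.Int.mod n d = 0 := (PySem.Int.mod_eq_zero_iff_dvd n d).mpr hdvd
        by_cases hxd : x = d
        · by_cases hne : d * d = n <;> simp [hdiv, hne, hxd]
        · -- y = d and x ≥ d + 1
          have hyd : y = d := by omega
          have hxgt : d + 1 ≤ x := by omega
          have hne : ¬ d * d = n := by nlinarith
          have hq : PySem.Int.floordiv n d = x := by
            rw [PySem.Int.floordiv_eq_ediv_of_pos hd0, ← hxy, hyd, mul_comm]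
            exact Int.mul_ediv_cancel_left x (by omega)
          simp [hdiv, hq, hne]
  | case2 d h =>
    intro hd x
    simp only [dif_neg h, List.not_mem_nil, false_iff]
    rintro ⟨y, hx1, hy1, hxy⟩
    exact h (by nlinarith)

theorem pvGen_nodup (n : Int) : ∀ d, 1 ≤ d → (pvGen n d).Nodup := by
  intro d
  fun_induction pvGen n d with
  | case1 d h ih =>
    intro hd
    have hd0 : (0:Int) < d := by omega
    have ih' := ih (by omega)
    rw [List.nodup_append]
    refine ⟨?_, ih', ?_⟩
    · by_cases hdiv : PySem.Int.mod n d = 0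
      · have hdvd : d ∣ n := (PySem.Int.mod_eq_zero_iff_dvd n d).mp hdiv
        obtain ⟨c, hc⟩ := hdvd
        have hq : PySem.Int.floordiv n d = c := by
          rw [PySem.Int.floordiv_eq_ediv_of_pos hd0, hc]
          exact Int.mul_ediv_cancel_left c (by omega)
        by_cases hne : d * d = n
        · simp [hdiv, hne]
        · simp [hdiv, hne, hq]
          intro hdc
          exact hne (by rw [hc, ← hdc])
      · simp [hdiv]
    · intro x hx y' hy' heq
      rw [← heq] at hy'
      obtain ⟨z, hz1, hz2, hz3⟩ := (pvGen_mem n (d + 1) (by omega) x).mp hy'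
      by_cases hdiv : PySem.Int.mod n d = 0
      · have hdvd : d ∣ n := (PySem.Int.mod_eq_zero_iff_dvd n d).mp hdiv
        obtain ⟨c, hc⟩ := hdvd
        have hq : PySem.Int.floordiv n d = c := by
          rw [PySem.Int.floordiv_eq_ediv_of_pos hd0, hc]
          exact Int.mul_ediv_cancel_left c (by omega)
        by_cases hne : d * d = n
        · simp [hdiv, hne] at hx
          omega
        · simp [hdiv, hne, hq] at hx
          rcases hx with hx | hx
          · omega
          · -- x = c, so c * z = n = c * d with c ≥ d + 1 > 0 forces z = d < d + 1
            have h1 : c * z = c * d := by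
              calc c * z = x * z := by rw [hx]
                _ = n := hz3
                _ = d * c := hc
                _ = c * d := by ring
            have hzd : z = d := mul_left_cancel₀ (by omega) h1
            omega
      · simp [hdiv] at hx
  | case2 d h =>
    intro _
    simp [dif_neg h]

-- membership in A's divisor list
theorem pvDivs_mem (n x : Int) :
    x ∈ pvDivs n ↔ ∃ y, 1 ≤ x ∧ 1 ≤ y ∧ x * y = n := by
  unfold pvDivs
  rw [List.mem_filter, PySem.List.mem_pyRange_one]
  constructor
  · rintro ⟨⟨hx1, hx2⟩, hdiv⟩
    have hdvd : x ∣ n := (PySem.Int.mod_eq_zero_iff_dvd n x).mp (by simpa using hdiv)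
    obtain ⟨c, hc⟩ := hdvd
    refine ⟨c, hx1, by nlinarith, hc.symm⟩
  · rintro ⟨y, hx1, hy1, hxy⟩
    refine ⟨⟨hx1, by nlinarith⟩, ?_⟩
    simpa using (PySem.Int.mod_eq_zero_iff_dvd n x).mpr ⟨y, hxy.symm⟩

theorem pvDivs_nodup (n : Int) : (pvDivs n).Nodup :=
  (PySem.List.nodup_pyRange_one 1 (n + 1)).filter _

theorem pvDivs_pairwise (n : Int) : (pvDivs n).Pairwise (· < ·) :=
  (PySem.List.pairwise_lt_pyRange_one 1 (n + 1)).filter _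

theorem pvPerm (n : Int) : (pvGen n 1).Perm (pvDivs n) := by
  rw [List.perm_ext_iff_of_nodup (pvGen_nodup n 1 le_rfl) (pvDivs_nodup n)]
  intro x
  rw [pvGen_mem n 1 le_rfl x, pvDivs_mem n x]

theorem pvSortedFilter (n : Int) (p : Int → Bool) :
    PySem.List.sorted ((pvGen n 1).filter p) (fun x => x) = (pvDivs n).filter p := by
  apply PySem.List.sorted_eq_of_perm_of_pairwise_lt
  · exact ((pvPerm n).filter p).symm
  · exact (pvDivs_pairwise n).filter p

-- ===== VERDICT (by name: the statement is the Claim_ definition above) =====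
theorem odd_even_factors_spec : Claim_equal_odd_even_factors := by
  intro number _
  unfold Spec_odd_even_factors
  rw [pvAchar]
  simp only [odd_even_factors_alt]
  rw [pvBfold]
  simp [pvSortedFilter]
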